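-- pv_equiv track=rewrite | github.com/ulasb/advent-of-code-python | 2016/day_09/decompress.py | get_decompressed_length_v1
-- ===== SOURCE A (Python) =====
-- def get_decompressed_length_v1(data: str) -> int:
--     """
--     Calculate the length of the decompressed data using version 1 rules.
--
--     In version 1, markers are not decompressed - even if the decompressed
--     text contains a marker-like sequence, it should be treated as raw text.
--
--     Parameters
--     ----------
--     data : str
--         The compressed string.
--
--     Returns
--     -------
--     int
--         The length of the decompressed string.
--     """
--     length = 0
--     i = 0
--     while i < len(data):
--         if data[i] == "(":
--             end_marker = data.find(")", i)
--             marker = data[i + 1 : end_marker]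
--             l, r = map(int, marker.split("x"))
--             i = end_marker + 1
--             length += l * r
--             i += l
--         else:
--             length += 1
--             i += 1
--     return length
-- ===== SOURCE B (Python) =====
-- def get_decompressed_length_v1(data: str) -> int:
--     length = 0
--     while data:
--         if data[0] == "(":
--             end = data.find(")")
--             l, r = map(int, data[1:end].split("x"))
--             length += l * r
--             data = data[end + 1 + l:]
--         else:
--             j = data.find("(")
--             if j == -1:
--                 return length + len(data)
--             length += j
--             data = data[j:]
--     return length
-- ===== Notes on version B (the rewrite author's own statement) =====
-- stated objective: faster
-- what changed: B restructures the scan as a string-consuming loop: instead of A's index pointer stepping one character at a time, B repeatedly slices the residual string, removing the head marker (data = data[end+1+l:]) or the whole literal run up to the next '(' in one step (data = data[j:]), so its loop runs once per marker/literal-run rather than once per character (find/len/slicing run in C).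
-- outside the precondition, e.g. on get_decompressed_length_v1('(-2x3)'): A returns -4, B returns -4; on get_decompressed_length_v1('(2x34'): A returns 9, B returns 9; on get_decompressed_length_v1('('): A raises ValueError, B raises ValueError
import Mathlib
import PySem

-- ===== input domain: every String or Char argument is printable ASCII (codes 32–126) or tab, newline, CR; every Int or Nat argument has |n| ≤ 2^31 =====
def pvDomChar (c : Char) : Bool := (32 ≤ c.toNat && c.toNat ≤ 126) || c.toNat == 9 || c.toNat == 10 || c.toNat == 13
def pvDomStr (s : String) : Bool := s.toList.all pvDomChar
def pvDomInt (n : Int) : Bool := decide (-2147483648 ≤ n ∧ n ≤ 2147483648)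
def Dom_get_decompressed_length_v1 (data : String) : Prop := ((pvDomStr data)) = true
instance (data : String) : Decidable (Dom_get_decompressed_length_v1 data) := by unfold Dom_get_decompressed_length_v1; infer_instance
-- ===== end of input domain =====

-- B consumes the compressed string from the front, slicing off a whole marker or literal run
-- per iteration instead of A's per-character index scan (measured faster); return value only.

-- ===== PORT A =====
-- while loop of A as fuelled recursion over (pointer, accumulator); fuel (length+1)
-- suffices on Pre_ inputs, where the pointer strictly increases each iteration; at a point
-- where Python raises ValueError the loop returns the accumulator (excluded by Pre_).
def pvALoop (s : List Char) : Nat → Int → Int → Int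
  | 0, _, length => length
  | fuel + 1, i, length =>
    if i < (s.length : Int) then
      match PySem.List.pyGet? s i with
      | none => length                 -- unreachable inside Pre_
      | some c =>
        if c = '(' then
          let e := PySem.Chars.findFrom s [')'] i none
          let marker := PySem.List.slice s (some (i + 1)) (some e)
          match PySem.Chars.split? marker ['x'] with
          | some [p1, p2] =>
            match PySem.Int.ofChars? p1, PySem.Int.ofChars? p2 with
            | some l, some r => pvALoop s fuel (e + 1 + l) (length + l * r)
            | _, _ => length           -- ValueError, excluded by Pre_
          | _ => length                -- ValueError, excluded by Pre_
        else
          pvALoop s fuel (i + 1) (length + 1)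
    else length

def get_decompressed_length_v1 (data : String) : Int :=
  pvALoop data.toList (data.toList.length + 1) 0 0

-- ===== PORT B =====
-- B's loop: the STATE is the residual string itself ('while data:'); each iteration
-- slices off the head marker (data = data[end+1+l:]) or the whole literal run up to the
-- next '(' (data = data[j:]); fuel (length+1) suffices: each iteration inside Pre_
-- consumes at least one character.
def pvBLoop : Nat → List Char → Int → Int
  | 0, _, length => length
  | fuel + 1, s, length =>
    match s with
    | [] => length
    | c :: rest =>
      if c = '(' then
        let e := PySem.Chars.find (c :: rest) [')']
        let marker := PySem.List.slice (c :: rest) (some 1) (some e)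
        match PySem.Chars.split? marker ['x'] with
        | some [p1, p2] =>
          match PySem.Int.ofChars? p1, PySem.Int.ofChars? p2 with
          | some l, some r =>
            pvBLoop fuel (PySem.List.slice (c :: rest) (some (e + 1 + l)) none) (length + l * r)
          | _, _ => length             -- ValueError, excluded by Pre_
        | _ => length                  -- ValueError, excluded by Pre_
      else
        let j := PySem.Chars.find (c :: rest) ['(']
        if j = -1 then length + ((c :: rest).length : Int)
        else pvBLoop fuel (PySem.List.slice (c :: rest) (some j) none) (length + j)

def get_decompressed_length_v1_alt (data : String) : Int :=
  pvBLoop (data.toList.length + 1) data.toList 0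

-- ===== PRECONDITION & SPEC =====
-- Fuelled form of the same grammar so that Pre_ is kernel-decidable ('decide' can evaluate
-- it); fuel = the string's length bounds the scan, which consumes a character per step;
-- pvGrammar_eq below shows it equals the well-founded acceptor pvWF used by the proofs.
def pvGrammar : Nat → List Char → Bool
  | _, [] => true
  | 0, _ :: _ => false
  | fuel + 1, c :: rest =>
    if c = '(' then
      let e := PySem.Chars.find rest [')']
      if e < 0 then false
      else
        match PySem.Chars.split? (rest.take e.toNat) ['x'] with
        | some [p1, p2] =>
          match PySem.Int.ofChars? p1, PySem.Int.ofChars? p2 with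
          | some l, some _ => decide (0 ≤ l) && pvGrammar fuel ((rest.drop (e.toNat + 1)).drop l.toNat)
          | _, _ => false
        | _ => false
    else pvGrammar fuel rest

-- Pre_ excludes inputs with an unterminated or negative-length marker: there A either raises
-- ValueError, or returns a value produced by Python's negative-slice/negative-index accidents
-- (or even loops forever); B mirrors A outside those accidents only.
def Pre_get_decompressed_length_v1 (data : String) : Prop := pvGrammar data.toList.length data.toList = true
instance (data : String) : Decidable (Pre_get_decompressed_length_v1 data) := by
  unfold Pre_get_decompressed_length_v1; infer_instance

def pvWitness_get_decompressed_length_v1 : String := "ab(2x3)cd(10x2)"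

def Spec_get_decompressed_length_v1 (data : String) (out : Int) : Prop := out = get_decompressed_length_v1_alt data
instance (data : String) (out : Int) : Decidable (Spec_get_decompressed_length_v1 data out) := by
  unfold Spec_get_decompressed_length_v1; infer_instance

-- ===== CLAIM (what is proved, stated in full; the proofs are below) =====
def Claim_equal_get_decompressed_length_v1 : Prop := ∀ (data : String), Dom_get_decompressed_length_v1 data → Pre_get_decompressed_length_v1 data → Spec_get_decompressed_length_v1 data (get_decompressed_length_v1 data)

-- ===== LEMMAS AND PROOFS =====

-- well-founded acceptor of the grammar (the proofs' induction follows it)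
def pvWF : List Char → Bool
  | [] => true
  | c :: rest =>
    if c = '(' then
      let e := PySem.Chars.find rest [')']
      if e < 0 then false
      else
        match PySem.Chars.split? (rest.take e.toNat) ['x'] with
        | some [p1, p2] =>
          match PySem.Int.ofChars? p1, PySem.Int.ofChars? p2 with
          | some l, some _ => decide (0 ≤ l) && pvWF ((rest.drop (e.toNat + 1)).drop l.toNat)
          | _, _ => false
        | _ => false
    else pvWF rest
  termination_by s => s.length
  decreasing_by all_goals (simp; try omega)


lemma pvGrammar_eq (fuel : Nat) (t : List Char) (h : t.length ≤ fuel) : pvGrammar fuel t = pvWF t := by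
  induction fuel generalizing t with
  | zero =>
    cases t with
    | nil => simp [pvGrammar, pvWF]
    | cons c rest => simp at h
  | succ fuel ih =>
    cases t with
    | nil => simp [pvGrammar, pvWF]
    | cons c rest =>
      have hr' : rest.length ≤ fuel := by simp at h; omega
      rw [pvGrammar, pvWF]
      by_cases hc : c = '('
      · simp only [hc, reduceIte]
        set e := PySem.Chars.find rest [')'] with hedef
        by_cases he : e < 0
        · simp only [if_pos he]
        · simp only [if_neg he]
          cases hsp : PySem.Chars.split? (rest.take e.toNat) ['x'] with
          | none => rfl
          | some ps =>
            rcases ps with _ | ⟨p1, _ | ⟨p2, _ | ⟨p3, tl⟩⟩⟩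
            · rfl
            · rfl
            · cases hl : PySem.Int.ofChars? p1 with
              | none => simp only [hl]
              | some l =>
                cases hrr : PySem.Int.ofChars? p2 with
                | none => simp only [hl, hrr]
                | some r =>
                  simp only [hl, hrr]
                  rw [ih ((rest.drop (e.toNat + 1)).drop l.toNat)
                        (by simp only [List.length_drop]; omega)]
            · rfl
      · simp only [if_neg hc]
        exact ih rest hr'

-- the decompressed length along the grammar (proof-side value both loops compute)
def pvLen : List Char → Int
  | [] => 0
  | c :: rest =>
    if c = '(' then
      let e := PySem.Chars.find rest [')']
      if e < 0 then 0
      else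
        match PySem.Chars.split? (rest.take e.toNat) ['x'] with
        | some [p1, p2] =>
          match PySem.Int.ofChars? p1, PySem.Int.ofChars? p2 with
          | some l, some r => l * r + pvLen ((rest.drop (e.toNat + 1)).drop l.toNat)
          | _, _ => 0
        | _ => 0
    else 1 + pvLen rest
  termination_by s => s.length
  decreasing_by all_goals (simp; try omega)

lemma pv_singleton_prefix (d : Char) (u : List Char) : [d] <+: u ↔ ∃ v, u = d :: v := by
  cases u with
  | nil => simp
  | cons a v => simp [List.cons_prefix_cons, eq_comm]

lemma pv_find_singleton_cons (c d : Char) (t : List Char) (h : c ≠ d) :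
    PySem.Chars.find (c :: t) [d] =
      if PySem.Chars.find t [d] = -1 then -1 else 1 + PySem.Chars.find t [d] := by
  by_cases hf : PySem.Chars.find t [d] = -1
  · rw [if_pos hf, PySem.Chars.find_eq_neg_one_iff]
    rw [PySem.Chars.find_eq_neg_one_iff] at hf
    simp only [List.singleton_infix_iff] at hf ⊢
    simp [List.mem_cons, hf, Ne.symm h]
  · simp only [if_neg hf]
    have hnn := PySem.Chars.neg_one_le_find t [d]
    have h0 : 0 ≤ PySem.Chars.find t [d] := by omega
    obtain ⟨hp, hmin⟩ := PySem.Chars.find_spec (s := t) (sub := [d]) h0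
    have hmem : d ∈ t := by
      rcases (pv_singleton_prefix d _).1 hp with ⟨v, hv⟩
      have : d ∈ List.drop (PySem.Chars.find t [d]).toNat t := by rw [hv]; simp
      exact List.mem_of_mem_drop this
    have h1 : 0 ≤ PySem.Chars.find (c :: t) [d] := by
      rw [PySem.Chars.find_nonneg_iff, List.singleton_infix_iff]
      simp [hmem]
    obtain ⟨hp2, hmin2⟩ := PySem.Chars.find_spec (s := c :: t) (sub := [d]) h1
    set f := PySem.Chars.find t [d] with hfdef
    set g := PySem.Chars.find (c :: t) [d] with hgdef
    have hg1 : 1 ≤ g.toNat := by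
      by_contra hcon
      have : g.toNat = 0 := by omega
      rw [this] at hp2
      simp only [List.drop_zero] at hp2
      rcases (pv_singleton_prefix d _).1 hp2 with ⟨v, hv⟩
      exact h (by injection hv)
    have hle : g.toNat ≤ 1 + f.toNat := by
      by_contra hcon
      have := hmin2 (1 + f.toNat) (by omega)
      apply this
      have hd : List.drop (1 + f.toNat) (c :: t) = List.drop f.toNat t := by
        rw [Nat.add_comm]; simp
      rw [hd]; exact hp
    have hge : 1 + f.toNat ≤ g.toNat := by
      by_contra hcon
      have := hmin (g.toNat - 1) (by omega)
      apply this
      have : List.drop (g.toNat - 1) t = List.drop g.toNat (c :: t) := by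
        have : g.toNat = (g.toNat - 1) + 1 := by omega
        rw [this]; simp
      rw [this]; exact hp2
    omega

-- A's literal step and the length over a '('-free run
lemma pvLen_skip (m : Nat) (t : List Char) (hm : m ≤ t.length)
    (h : ∀ i < m, ¬ [ '(' ] <+: t.drop i) :
    pvLen t = m + pvLen (t.drop m) ∧ pvWF t = pvWF (t.drop m) := by
  induction m generalizing t with
  | zero => simp
  | succ m ih =>
    cases t with
    | nil => simp at hm
    | cons c rest =>
      have hc : c ≠ '(' := by
        intro hcon
        exact h 0 (by omega) (by simp [hcon])
      have h' : ∀ i < m, ¬ [ '(' ] <+: rest.drop i := by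
        intro i hi
        have := h (i + 1) (by omega)
        simpa using this
      obtain ⟨h1, h2⟩ := ih rest (by simpa using hm) h'
      refine ⟨?_, ?_⟩
      · show pvLen (c :: rest) = _
        rw [pvLen]
        simp only [if_neg hc]
        rw [h1]
        simp only [List.drop_succ_cons]
        push_cast
        ring
      · show pvWF (c :: rest) = _
        rw [pvWF]
        simp only [if_neg hc]
        rw [h2]
        simp [List.drop_succ_cons]

lemma pvLen_no_paren (t : List Char) (h : '(' ∉ t) : pvLen t = t.length ∧ pvWF t = true := by
  induction t with
  | nil => simp [pvLen, pvWF]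
  | cons c rest ih =>
    have hc : c ≠ '(' := by intro hcon; exact h (by simp [hcon])
    obtain ⟨h1, h2⟩ := ih (by intro hcon; exact h (by simp [hcon]))
    constructor
    · rw [pvLen]; simp only [if_neg hc]; rw [h1]; simp; ring
    · rw [pvWF]; simp only [if_neg hc]; exact h2

lemma pv_step (s : List Char) (p : Nat) (hp : p < s.length) (hc : s[p] = '(')
    (hwf : pvWF (s.drop p) = true) :
    ∃ (en : Nat) (p1 p2 : List Char) (l r : Int),
      PySem.Chars.findFrom s [')'] (p : Int) none = (p : Int) + 1 + (en : Int) ∧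
      PySem.List.slice s (some ((p : Int) + 1)) (some ((p : Int) + 1 + (en : Int))) =
        List.take en (s.drop (p + 1)) ∧
      PySem.Chars.split? (List.take en (s.drop (p + 1))) ['x'] = some [p1, p2] ∧
      PySem.Int.ofChars? p1 = some l ∧
      PySem.Int.ofChars? p2 = some r ∧
      0 ≤ l ∧
      pvWF (s.drop (p + 1 + en + 1 + l.toNat)) = true ∧
      pvLen (s.drop p) = l * r + pvLen (s.drop (p + 1 + en + 1 + l.toNat)) ∧
      (p : Int) + 1 + (en : Int) + 1 + l = ((p + 1 + en + 1 + l.toNat : Nat) : Int) := by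
  have hdp : s.drop p = '(' :: s.drop (p + 1) := by
    rw [List.drop_eq_getElem_cons hp, hc]
  have hwf' := hwf
  rw [hdp, pvWF] at hwf'
  set e := PySem.Chars.find (s.drop (p + 1)) [')'] with hedef
  by_cases he : e < 0
  · rw [if_pos he] at hwf'; exact absurd hwf' (by simp)
  rw [if_neg he] at hwf'
  have he0 : 0 ≤ e := by omega
  have heen : e = ((e.toNat : Nat) : Int) := (Int.toNat_of_nonneg he0).symm
  cases hsp : PySem.Chars.split? (List.take e.toNat (s.drop (p + 1))) ['x'] with
  | none => rw [hsp] at hwf'; exact absurd hwf' (by simp)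
  | some ps =>
    rw [hsp] at hwf'
    match ps, hwf' with
    | [p1, p2], hwf' =>
      have hwf2 : (match PySem.Int.ofChars? p1, PySem.Int.ofChars? p2 with
          | some l, some _ => decide (0 ≤ l) &&
              pvWF (List.drop l.toNat (List.drop (e.toNat + 1) (List.drop (p + 1) s)))
          | _, _ => false) = true := by
        simpa using hwf'
      clear hwf'
      cases hl : PySem.Int.ofChars? p1 with
      | none => rw [hl] at hwf2; exact absurd hwf2 (by simp)
      | some l =>
        cases hr : PySem.Int.ofChars? p2 with
        | none => rw [hl, hr] at hwf2; exact absurd hwf2 (by simp)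
        | some r =>
          rw [hl, hr] at hwf2
          simp only [Bool.and_eq_true, decide_eq_true_eq] at hwf2
          obtain ⟨hl0, hwfX⟩ := hwf2
          have hdropX : (List.drop (e.toNat + 1) (s.drop (p + 1))).drop l.toNat =
              s.drop (p + 1 + e.toNat + 1 + l.toNat) := by
            rw [List.drop_drop, List.drop_drop]
            congr 1
            omega
          refine ⟨e.toNat, p1, p2, l, r, ?_, ?_, hsp, hl, hr, hl0, ?_, ?_, ?_⟩
          · rw [PySem.Chars.findFrom_natCast s [')'] p (Nat.le_of_lt hp), hdp,
              pv_find_singleton_cons '(' ')' _ (by decide), ← hedef]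
            have hne : ¬ e = -1 := by omega
            rw [if_neg hne]
            have : ¬ (1 + e = -1) := by omega
            rw [if_neg this]
            omega
          · have h1 : ((p : Int) + 1) = ((p + 1 : Nat) : Int) := by push_cast; ring
            have h2 : ((p : Int) + 1 + (e.toNat : Int)) = ((p + 1 + e.toNat : Nat) : Int) := by
              push_cast; ring
            rw [h2, h1, PySem.List.slice_natCast]
            congr 1
            omega
          · rw [hdropX] at hwfX; exact hwfX
          · rw [hdp, pvLen]
            simp only [← hedef, if_neg he, hsp, hl, hr, hdropX, if_true]
          · rw [heen]
            push_cast [Int.toNat_of_nonneg hl0]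
            ring

lemma pv_mainA (s : List Char) (fuel : Nat) (k : Nat) (acc : Int)
    (hf : s.length ≤ k + fuel) (hwf : pvWF (s.drop k) = true) :
    pvALoop s fuel (k : Int) acc = acc + pvLen (s.drop k) := by
  induction fuel generalizing k acc with
  | zero =>
    have hnil : s.drop k = [] := List.drop_eq_nil_of_le (by omega)
    simp [pvALoop, hnil, pvLen]
  | succ fuel ih =>
    by_cases hk : k < s.length
    · have hkk : ((k : Int) < (s.length : Int)) := by exact_mod_cast hk
      have hdp : s.drop k = s[k] :: s.drop (k + 1) := List.drop_eq_getElem_cons hk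
      rw [pvALoop, if_pos hkk, PySem.List.pyGet?_natCast, List.getElem?_eq_getElem hk]
      by_cases hc : s[k] = '('
      · obtain ⟨en, p1, p2, l, r, hfind, hslice, hsp, hl, hr, hl0, hwfX, hlen, hcast⟩ :=
          pv_step s k hk hc hwf
        simp only [hc, reduceIte, hfind, hslice, hsp, hl, hr]
        rw [show (k : Int) + 1 + (en : Int) + 1 + l = ((k + 1 + en + 1 + l.toNat : Nat) : Int)
              from hcast]
        rw [ih (k + 1 + en + 1 + l.toNat) (acc + l * r) (by omega) hwfX, hlen]
        ring
      · simp only [hc, reduceIte]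
        rw [show (k : Int) + 1 = ((k + 1 : Nat) : Int) by push_cast; ring]
        have hwf' : pvWF (s.drop (k + 1)) = true := by
          rw [hdp, pvWF] at hwf
          simpa only [if_neg hc] using hwf
        rw [ih (k + 1) (acc + 1) (by omega) hwf']
        rw [hdp, pvLen]
        simp only [if_neg hc]
        ring
    · have hkk : ¬ ((k : Int) < (s.length : Int)) := by exact_mod_cast hk
      have hnil : s.drop k = [] := List.drop_eq_nil_of_le (by omega)
      rw [pvALoop, if_neg hkk]
      simp [hnil, pvLen]

-- the marker step seen by B, on the residual list itself
lemma pv_stepB (c : Char) (rest : List Char) (hc : c = '(')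
    (hwf : pvWF (c :: rest) = true) :
    ∃ (en : Nat) (p1 p2 : List Char) (l r : Int),
      PySem.Chars.find (c :: rest) [')'] = 1 + (en : Int) ∧
      PySem.List.slice (c :: rest) (some 1) (some (1 + (en : Int))) = rest.take en ∧
      PySem.Chars.split? (rest.take en) ['x'] = some [p1, p2] ∧
      PySem.Int.ofChars? p1 = some l ∧
      PySem.Int.ofChars? p2 = some r ∧
      0 ≤ l ∧
      PySem.List.slice (c :: rest) (some (1 + (en : Int) + 1 + l)) none =
        rest.drop (en + 1 + l.toNat) ∧
      pvWF (rest.drop (en + 1 + l.toNat)) = true ∧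
      pvLen (c :: rest) = l * r + pvLen (rest.drop (en + 1 + l.toNat)) := by
  subst hc
  have hwf' := hwf
  rw [pvWF] at hwf'
  simp only [reduceIte] at hwf'
  set e := PySem.Chars.find rest [')'] with hedef
  by_cases he : e < 0
  · rw [if_pos he] at hwf'; exact absurd hwf' (by simp)
  rw [if_neg he] at hwf'
  have he0 : 0 ≤ e := by omega
  have heen : e = ((e.toNat : Nat) : Int) := (Int.toNat_of_nonneg he0).symm
  cases hsp : PySem.Chars.split? (rest.take e.toNat) ['x'] with
  | none => rw [hsp] at hwf'; exact absurd hwf' (by simp)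
  | some ps =>
    rw [hsp] at hwf'
    match ps, hwf' with
    | [p1, p2], hwf' =>
      have hwf2 : (match PySem.Int.ofChars? p1, PySem.Int.ofChars? p2 with
          | some l, some _ => decide (0 ≤ l) &&
              pvWF (List.drop l.toNat (List.drop (e.toNat + 1) rest))
          | _, _ => false) = true := by
        simpa using hwf'
      clear hwf'
      cases hl : PySem.Int.ofChars? p1 with
      | none => rw [hl] at hwf2; exact absurd hwf2 (by simp)
      | some l =>
        cases hr : PySem.Int.ofChars? p2 with
        | none => rw [hl, hr] at hwf2; exact absurd hwf2 (by simp)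
        | some r =>
          rw [hl, hr] at hwf2
          simp only [Bool.and_eq_true, decide_eq_true_eq] at hwf2
          obtain ⟨hl0, hwfX⟩ := hwf2
          have hdropX : (List.drop (e.toNat + 1) rest).drop l.toNat =
              rest.drop (e.toNat + 1 + l.toNat) := by
            rw [List.drop_drop]
          refine ⟨e.toNat, p1, p2, l, r, ?_, ?_, hsp, hl, hr, hl0, ?_, ?_, ?_⟩
          · rw [pv_find_singleton_cons '(' ')' rest (by decide), ← hedef]
            have hne : ¬ e = -1 := by omega
            rw [if_neg hne]
            omega
          · have h2 : ((1 : Int) + (e.toNat : Int)) = ((1 + e.toNat : Nat) : Int) := by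
              push_cast; ring
            rw [h2, show ((1 : Int)) = ((1 : Nat) : Int) by norm_num,
              PySem.List.slice_natCast,
              show (1 : Nat) + e.toNat - 1 = e.toNat by omega]
            rw [List.drop_one, List.tail_cons]
          · have h3 : (1 : Int) + (e.toNat : Int) + 1 + l
                = ((1 + e.toNat + 1 + l.toNat : Nat) : Int) := by
              push_cast [Int.toNat_of_nonneg hl0]; ring
            rw [h3, PySem.List.slice_from_natCast,
              show 1 + e.toNat + 1 + l.toNat = (e.toNat + 1 + l.toNat) + 1 by omega]
            rw [List.drop_succ_cons]
          · rw [← hdropX]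
            exact hwfX
          · rw [pvLen]
            simp only [reduceIte, ← hedef, if_neg he, hsp, hl, hr, hdropX]

lemma pv_mainB (fuel : Nat) (t : List Char) (acc : Int)
    (hf : t.length ≤ fuel) (hwf : pvWF t = true) :
    pvBLoop fuel t acc = acc + pvLen t := by
  induction fuel generalizing t acc with
  | zero =>
    have hnil : t = [] := List.length_eq_zero_iff.mp (by omega)
    simp [pvBLoop, hnil, pvLen]
  | succ fuel ih =>
    cases t with
    | nil => simp [pvBLoop, pvLen]
    | cons c rest =>
      rw [pvBLoop]
      by_cases hc : c = '('
      · subst hc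
        obtain ⟨en, p1, p2, l, r, hfind, hslice, hsp, hl, hr, hl0, hslice2, hwfX, hlen⟩ :=
          pv_stepB '(' rest rfl hwf
        simp only [reduceIte]
        rw [hfind, hslice, hsp]
        simp only [hl, hr]
        rw [hslice2]
        rw [ih (rest.drop (en + 1 + l.toNat)) (acc + l * r)
              (by simp at hf ⊢; omega) hwfX]
        rw [hlen]
        ring
      · simp only [if_neg hc]
        by_cases hj : PySem.Chars.find (c :: rest) ['('] = -1
        · rw [if_pos hj]
          have hnp : '(' ∉ c :: rest := by
            rw [PySem.Chars.find_eq_neg_one_iff, List.singleton_infix_iff] at hj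
            exact hj
          obtain ⟨h1, _⟩ := pvLen_no_paren _ hnp
          rw [h1]
        · rw [if_neg hj]
          have hm0 : 0 ≤ PySem.Chars.find (c :: rest) ['('] := by
            have := PySem.Chars.neg_one_le_find (c :: rest) ['(']
            omega
          set m := (PySem.Chars.find (c :: rest) ['(']).toNat with hmdef
          have hmc : PySem.Chars.find (c :: rest) ['('] = (m : Int) :=
            (Int.toNat_of_nonneg hm0).symm
          obtain ⟨hpre, hmin⟩ := PySem.Chars.find_spec (s := c :: rest) (sub := ['(']) hm0
          rw [← hmdef] at hpre hmin
          have hm1 : 1 ≤ m := by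
            by_contra hcon
            have hm00 : m = 0 := by omega
            rw [hm00, List.drop_zero] at hpre
            rcases (pv_singleton_prefix _ _).1 hpre with ⟨v, hv⟩
            exact hc (by injection hv)
          have hmlen : m ≤ (c :: rest).length := by
            by_contra hcon
            have : (c :: rest).drop m = [] := List.drop_eq_nil_of_le (by omega)
            rw [this] at hpre
            exact absurd hpre (by simp)
          obtain ⟨hskipLen, hskipWF⟩ := pvLen_skip m (c :: rest) hmlen hmin
          rw [hmc, PySem.List.slice_from_natCast]
          rw [ih ((c :: rest).drop m) (acc + (m : Int))
                (by simp at hf ⊢; omega) (by rw [← hskipWF]; exact hwf)]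
          rw [hskipLen]
          ring

-- ===== VERDICT (by name: the statement is the Claim_ definition above) =====
theorem get_decompressed_length_v1_spec : Claim_equal_get_decompressed_length_v1 := by
  intro data _ hpre
  unfold Spec_get_decompressed_length_v1 get_decompressed_length_v1 get_decompressed_length_v1_alt
  have hwf : pvWF data.toList = true := by
    rw [← pvGrammar_eq data.toList.length data.toList le_rfl]; exact hpre
  have hA := pv_mainA data.toList (data.toList.length + 1) 0 0 (by omega)
    (by simpa using hwf)
  have hB := pv_mainB (data.toList.length + 1) data.toList 0 (by omega) hwf
  simpa using hA.trans hB.symm
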